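-- pv_equiv track=rewrite | github.com/Jidanur/Number-converter | number converter.py | binary_to_dec
-- ===== SOURCE A (Python) =====
-- def binary_to_dec(binary_orig):
--     result = 0
--     out_powers = []
--     for ind, digit in enumerate(reversed(list(binary_orig))):
--         if digit == "1":
--             power_val = ind
--             out_powers += [power_val]
--             result += 2 ** power_val
--     out_txt = " + ".join(map(lambda x: f"2^{x}", out_powers))
--     out_txt += " = " + " + ".join(map(lambda x: f"{2**x}", out_powers))
--     return (out_txt, result)
-- ===== SOURCE B (Python) =====
-- def binary_to_dec(binary_orig):
--     # Different algorithm: compute the value first by a forward Horner pass,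
--     # then recover the powers from the NUMBER by bit extraction (repeated
--     # halving), instead of scanning the string for '1' positions.
--     result = 0
--     for ch in binary_orig:
--         result = result * 2 + (1 if ch == "1" else 0)
--     powers = []
--     m, p = result, 0
--     while m:
--         if m % 2:
--             powers.append(p)
--         m //= 2
--         p += 1
--     out_txt = " + ".join(f"2^{x}" for x in powers)
--     out_txt += " = " + " + ".join(f"{2**x}" for x in powers)
--     return (out_txt, result)
-- ===== Notes on version B (the rewrite author's own statement) =====
-- stated objective: alternative
-- what changed: Replaces A's reversed-enumeration scan (collecting '1' positions and summing 2**ind) by a forward Horner pass computing the value alone, then recovers the power list from the number itself by repeated halving/bit extraction instead of from the string.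
import Mathlib
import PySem

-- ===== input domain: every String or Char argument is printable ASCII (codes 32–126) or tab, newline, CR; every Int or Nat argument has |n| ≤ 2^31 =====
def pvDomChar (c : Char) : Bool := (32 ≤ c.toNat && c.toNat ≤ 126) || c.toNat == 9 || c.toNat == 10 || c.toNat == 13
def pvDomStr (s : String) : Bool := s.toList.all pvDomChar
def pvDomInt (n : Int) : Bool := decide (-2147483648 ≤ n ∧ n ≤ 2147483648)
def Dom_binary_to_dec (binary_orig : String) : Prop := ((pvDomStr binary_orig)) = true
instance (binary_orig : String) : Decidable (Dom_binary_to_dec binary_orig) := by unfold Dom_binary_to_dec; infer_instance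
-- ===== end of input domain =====

-- B computes the value first by a forward Horner pass and then recovers the powers
-- from the number itself by bit extraction (repeated halving), instead of A's scan of
-- the reversed string for '1' positions; objective: alternative algorithm, same value.

-- ===== PORT A =====
-- A's loop body: on '1' at reversed-index ind, add the power and 2**ind.
-- 2 ** power_val with power_val = ind ≥ 0 (an enumerate index) is (2:Int) ^ ind.toNat.
def pvAstep (st : Int × List Int) (p : Int × Char) : Int × List Int :=
  if p.2 = '1' then (st.1 + 2 ^ p.1.toNat, st.2 ++ [p.1]) else st

def binary_to_dec (binary_orig : String) : String × Int :=
  let st := (PySem.List.enumerate binary_orig.toList.reverse 0).foldl pvAstep (0, [])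
  let out_txt := PySem.Str.join " + " (st.2.map (fun x => "2^" ++ PySem.Int.toStr x))
  let out_txt := out_txt ++ " = " ++ PySem.Str.join " + " (st.2.map (fun x => PySem.Int.toStr ((2 : Int) ^ x.toNat)))
  (out_txt, st.1)

-- ===== PORT B =====
-- B's while-loop: m is the Horner value, always ≥ 0, so it is carried as a Nat
-- (the loop recurses on m // 2 and tests m % 2 — exact for nonnegative ints).
def pvBits (m : Nat) (p : Int) : List Int :=
  if m = 0 then [] else (if m % 2 = 1 then [p] else []) ++ pvBits (m / 2) (p + 1)
decreasing_by exact Nat.div_lt_self (Nat.pos_of_ne_zero (by assumption)) (by norm_num)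

def binary_to_dec_alt (binary_orig : String) : String × Int :=
  let result := binary_orig.toList.foldl (fun a c => a * 2 + (if c = '1' then 1 else 0)) (0 : Int)
  let powers := pvBits result.toNat 0
  let out_txt := PySem.Str.join " + " (powers.map (fun x => "2^" ++ PySem.Int.toStr x))
  let out_txt := out_txt ++ " = " ++ PySem.Str.join " + " (powers.map (fun x => PySem.Int.toStr ((2 : Int) ^ x.toNat)))
  (out_txt, result)

-- ===== PRECONDITION & SPEC =====
def Spec_binary_to_dec (binary_orig : String) (out : String × Int) : Prop := out = binary_to_dec_alt binary_orig
instance (binary_orig : String) (out : String × Int) : Decidable (Spec_binary_to_dec binary_orig out) := by unfold Spec_binary_to_dec; infer_instance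

-- ===== CLAIM (what is proved, stated in full; the proofs are below) =====
def Claim_equal_binary_to_dec : Prop := ∀ (binary_orig : String), Dom_binary_to_dec binary_orig → Spec_binary_to_dec binary_orig (binary_to_dec binary_orig)

-- ===== LEMMAS AND PROOFS =====

-- bit value of a character, and the Horner value of a char list (MSB first)
def pvBit (c : Char) : Int := if c = '1' then 1 else 0
def pvVal (l : List Char) : Int := l.foldl (fun a c => a * 2 + pvBit c) 0
-- A's ascending power list, enumerate start s
def pvAsc (s : Int) (l : List Char) : List Int :=
  (PySem.List.enumerate l.reverse s).filterMap (fun p => if p.2 = '1' then some p.1 else none)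

theorem pvVal_shift (l : List Char) : ∀ a : Int,
    l.foldl (fun a c => a * 2 + pvBit c) a = a * 2 ^ l.length + pvVal l := by
  induction l with
  | nil => intro a; simp [pvVal]
  | cons c t ih =>
      intro a
      rw [List.foldl_cons, ih (a * 2 + pvBit c)]
      have hv : pvVal (c :: t) = (0 * 2 + pvBit c) * 2 ^ t.length + pvVal t := by
        rw [pvVal, List.foldl_cons, ih (0 * 2 + pvBit c)]
      rw [hv, List.length_cons]
      ring

theorem pvVal_nonneg (l : List Char) : 0 ≤ pvVal l ∧ pvVal l < 2 ^ l.length := by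
  induction l with
  | nil => simp [pvVal]
  | cons c t ih =>
      have hv : pvVal (c :: t) = pvBit c * 2 ^ t.length + pvVal t := by
        simp only [pvVal, List.foldl_cons]
        rw [pvVal_shift t (0 * 2 + pvBit c)]; simp only [pvVal]; ring
      have hb : pvBit c = 0 ∨ pvBit c = 1 := by
        by_cases hc : c = '1' <;> simp [pvBit, hc]
      have hp : (0:Int) < 2 ^ t.length := by positivity
      rw [hv, List.length_cons, pow_succ]
      rcases hb with h | h <;> rw [h] <;> constructor <;> nlinarith [ih.1, ih.2]

theorem pvAsc_cons (c : Char) (t : List Char) (s : Int) :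
    pvAsc s (c :: t) = pvAsc s t ++ (if c = '1' then [s + (t.length : Int)] else []) := by
  have hrev : (c :: t).reverse = t.reverse ++ [c] := by simp
  simp only [pvAsc, hrev, PySem.List.enumerate_append, List.filterMap_append]
  have hl : (t.reverse.length : Int) = (t.length : Int) := by simp
  by_cases hc : c = '1' <;> simp [PySem.List.enumerate, hc]

theorem pvAfold (l : List Char) : ∀ (k : Nat) (r : Int) (ps : List Int),
    (PySem.List.enumerate l.reverse (k : Int)).foldl pvAstep (r, ps)
      = (r + 2 ^ k * pvVal l, ps ++ pvAsc (k : Int) l) := by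
  induction l with
  | nil => intro k r ps; simp [pvAsc, pvVal]
  | cons c t ih =>
      intro k r ps
      have hrev : (c :: t).reverse = t.reverse ++ [c] := by simp
      rw [hrev, PySem.List.enumerate_append, List.foldl_append, ih]
      have hval : pvVal (c :: t) = pvBit c * 2 ^ t.length + pvVal t := by
        simp only [pvVal, List.foldl_cons]
        rw [pvVal_shift t (0 * 2 + pvBit c)]; simp only [pvVal]; ring
      have hlen : (t.reverse.length : Int) = (t.length : Int) := by simp
      rw [pvAsc_cons, hval]
      simp only [PySem.List.enumerate, List.foldl_cons, List.foldl_nil, pvAstep, hlen]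
      by_cases hc : c = '1'
      · have htoNat : ((k : Int) + (t.length : Int)).toNat = k + t.length := by omega
        rw [if_pos hc, if_pos hc, htoNat]
        have hb : pvBit c = 1 := by simp [pvBit, hc]
        simp only [Prod.mk.injEq, hb]
        refine ⟨by ring, by simp⟩
      · rw [if_neg hc, if_neg hc]
        have hb : pvBit c = 0 := by simp [pvBit, hc]
        simp only [Prod.mk.injEq, hb]
        refine ⟨by ring, by simp⟩

-- one unguarded unfolding step of pvBits (valid also at m = 0)
theorem pvBits_step (m : Nat) (p : Int) :
    pvBits m p = (if m % 2 = 1 then [p] else []) ++ pvBits (m / 2) (p + 1) := by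
  by_cases h : m = 0
  · subst h; simp [pvBits]
  · rw [pvBits]; simp [h]

-- adding a strictly dominating power appends its exponent at the end
theorem pvBits_add_pow (n : Nat) : ∀ (m : Nat) (p : Int), m < 2 ^ n →
    pvBits (m + 2 ^ n) p = pvBits m p ++ [p + (n : Int)] := by
  induction n with
  | zero =>
      intro m p hm
      interval_cases m
      simp [pvBits]
  | succ n ih =>
      intro m p hm
      have hp : 2 ^ (n + 1) = 2 ^ n * 2 := pow_succ 2 n
      rw [pvBits_step (m + 2 ^ (n + 1)) p]
      have hmod : (m + 2 ^ (n + 1)) % 2 = m % 2 := by rw [hp]; omega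
      have hdiv : (m + 2 ^ (n + 1)) / 2 = m / 2 + 2 ^ n := by rw [hp]; omega
      have hlt : m / 2 < 2 ^ n := by rw [hp] at hm; omega
      rw [hmod, hdiv, ih (m / 2) (p + 1) hlt, pvBits_step m p, List.append_assoc]
      have hc : p + 1 + (n : Int) = p + ((n : Nat) + 1 : Nat) := by push_cast; ring
      rw [hc]

-- B's bit extraction of the Horner value is exactly A's ascending power list
theorem pvBits_val (l : List Char) : pvBits (pvVal l).toNat 0 = pvAsc 0 l := by
  induction l with
  | nil => rw [pvBits]; simp [pvVal, pvAsc]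
  | cons c t ih =>
      have hval : pvVal (c :: t) = pvBit c * 2 ^ t.length + pvVal t := by
        simp only [pvVal, List.foldl_cons]
        rw [pvVal_shift t (0 * 2 + pvBit c)]; simp only [pvVal]; ring
      have ht := pvVal_nonneg t
      rw [pvAsc_cons, hval]
      by_cases hc : c = '1'
      · have hb : pvBit c = 1 := by simp [pvBit, hc]
        rw [hb, if_pos hc]
        have hcast : ((2 ^ t.length : Nat) : Int) = 2 ^ t.length := by push_cast; ring
        have htn : (1 * 2 ^ t.length + pvVal t).toNat = (pvVal t).toNat + 2 ^ t.length := by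
          omega
        have hlt : (pvVal t).toNat < 2 ^ t.length := by omega
        rw [htn, pvBits_add_pow t.length _ 0 hlt, ih]
      · have hb : pvBit c = 0 := by simp [pvBit, hc]
        rw [hb, if_neg hc]
        simp only [zero_mul, zero_add, List.append_nil]
        exact ih

-- ===== VERDICT (by name: the statement is the Claim_ definition above) =====
theorem binary_to_dec_spec : Claim_equal_binary_to_dec := by
  intro s _
  unfold Spec_binary_to_dec
  have hA := pvAfold s.toList 0 0 []
  simp only [Nat.cast_zero] at hA
  have hB : s.toList.foldl (fun a c => a * 2 + (if c = '1' then 1 else 0)) (0 : Int) = pvVal s.toList := by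
    simp only [pvVal, pvBit]
  simp only [binary_to_dec, binary_to_dec_alt, hA, hB, pvBits_val, List.nil_append]
  norm_num
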